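-- pv_equiv track=rewrite | github.com/yashjaiswal1/CTCI-DSA | ds/competitions/kickstart-roundB.py | IncreasingSubstring
-- ===== SOURCE A (Python) =====
-- def IncreasingSubstring(n, string):
--     string_length = len(string)
--     current_substring = ""
--     substring_positional_lengths = []
--     for i in range(string_length):
--         current_substring += string[i]
--         substring_positional_lengths.append(str(len(current_substring)))
--
--         if i == string_length - 1:
--             return substring_positional_lengths
--         elif string[i] < string[i+1]:
--             pass
--         else:
--             current_substring = ""
-- ===== SOURCE B (Python) =====
-- def IncreasingSubstring(n, string):
--     # Different decomposition: repeatedly find the end of the maximal increasing run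
--     # starting at i, emit labels 1..(k-i) for it, then jump to k.
--     # Empty input naturally yields [] (A returns None there).
--     out = []
--     i = 0
--     while i < len(string):
--         k = i + 1
--         while k < len(string) and string[k - 1] < string[k]:
--             k += 1
--         for j in range(k - i):
--             out.append(str(j + 1))
--         i = k
--     return out
-- ===== Notes on version B (the rewrite author's own statement) =====
-- stated objective: alternative
-- what changed: A makes one indexed pass carrying a growing current_substring buffer and emitting its length at each position; B instead repeatedly finds the end of the maximal increasing run with an inner scan and emits the whole label block 1..k for it at once.
-- outside the precondition, e.g. on IncreasingSubstring(0, ''): A returns None, B returns []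
import Mathlib
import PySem

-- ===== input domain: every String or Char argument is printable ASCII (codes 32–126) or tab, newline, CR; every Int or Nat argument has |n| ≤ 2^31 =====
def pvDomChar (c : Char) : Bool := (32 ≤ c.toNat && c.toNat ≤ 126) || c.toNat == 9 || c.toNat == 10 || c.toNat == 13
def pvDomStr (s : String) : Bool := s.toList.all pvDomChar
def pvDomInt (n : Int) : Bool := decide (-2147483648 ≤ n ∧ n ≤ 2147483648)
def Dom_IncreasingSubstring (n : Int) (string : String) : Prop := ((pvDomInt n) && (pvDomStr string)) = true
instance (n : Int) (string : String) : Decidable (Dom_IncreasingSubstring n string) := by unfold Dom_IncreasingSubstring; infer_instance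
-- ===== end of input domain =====

-- B repeatedly locates the end of the maximal increasing run and labels it 1..k as a block,
-- instead of A's single indexed pass carrying a growing current-substring buffer.

-- ===== PORT A =====
-- A's for-loop: state = (current_substring, substring_positional_lengths), index i;
-- early return at i = len-1; falling through the loop (empty string: Python returns None) yields acc
def goA (cs : List Char) (i : Nat) (cur : List Char) (acc : List String) : List String :=
  if h : i < cs.length then
    let cur' := cur ++ [cs.getD i ' ']
    let acc' := acc ++ [PySem.Int.toStr ((cur'.length : Int))]
    if i = cs.length - 1 then acc'
    else if cs.getD i ' ' < cs.getD (i+1) ' ' then goA cs (i+1) cur' acc'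
    else goA cs (i+1) [] acc'
  else acc
termination_by cs.length - i

def IncreasingSubstring (n : Int) (string : String) : List String :=
  goA string.toList 0 [] []

-- ===== PORT B =====
-- B's inner while-loop: advance k while string[k-1] < string[k]
def runB (cs : List Char) (k : Nat) : Nat :=
  if k < cs.length ∧ cs.getD (k-1) ' ' < cs.getD k ' ' then runB cs (k+1) else k
termination_by cs.length - k
decreasing_by omega

-- needed for goB's termination (each run is non-empty, so i strictly advances)
theorem runB_ge (cs : List Char) (k : Nat) : k ≤ runB cs k := by
  fun_induction runB cs k with
  | case1 k h ih => omega
  | case2 k h => omega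

-- B's outer while-loop over the run start i: emit labels 1..(k-i), jump to k
def goB (cs : List Char) (i : Nat) : List String :=
  if h : i < cs.length then
    let k := runB cs (i+1)
    ((List.range (k - i)).map (fun j : Nat => PySem.Int.toStr ((j : Int) + 1))) ++ goB cs k
  else []
termination_by cs.length - i
decreasing_by
  have h1 : i + 1 ≤ runB cs (i+1) := runB_ge cs (i+1)
  omega

def IncreasingSubstring_alt (n : Int) (string : String) : List String :=
  goB string.toList 0

-- ===== PRECONDITION & SPEC =====
-- Pre_ excludes only the empty string: there A falls through its loop and returns None,
-- which is not a value of the declared list-of-str result type (B naturally returns []).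
def Pre_IncreasingSubstring (n : Int) (string : String) : Prop := string ≠ ""
instance (n : Int) (string : String) : Decidable (Pre_IncreasingSubstring n string) := by
  unfold Pre_IncreasingSubstring; infer_instance
def pvWitness_IncreasingSubstring : Int × String := (0, "abcab")

def Spec_IncreasingSubstring (n : Int) (string : String) (out : List String) : Prop := out = IncreasingSubstring_alt n string
instance (n : Int) (string : String) (out : List String) : Decidable (Spec_IncreasingSubstring n string out) := by unfold Spec_IncreasingSubstring; infer_instance

-- ===== CLAIM (what is proved, stated in full; the proofs are below) =====
def Claim_equal_IncreasingSubstring : Prop := ∀ (n : Int) (string : String), Dom_IncreasingSubstring n string → Pre_IncreasingSubstring n string → Spec_IncreasingSubstring n string (IncreasingSubstring n string)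

-- ===== LEMMAS AND PROOFS =====

-- reference function: per-position run-length labels, counter c = length of the run so far
def spec (c : Nat) : List Char → List String
  | [] => []
  | [_] => [PySem.Int.toStr ((c : Int) + 1)]
  | x :: y :: r =>
      PySem.Int.toStr ((c : Int) + 1) ::
        (if x < y then spec (c+1) (y :: r) else spec 0 (y :: r))

theorem goA_eq_spec (cs : List Char) (i : Nat) (cur : List Char) (acc : List String)
    (hi : i < cs.length) : goA cs i cur acc = acc ++ spec cur.length (cs.drop i) := by
  fun_induction goA cs i cur acc with
  | case1 cur acc h cur' acc' =>
      have hdrop : cs.drop (cs.length - 1) = [cs[cs.length - 1]] := by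
        rw [List.drop_eq_getElem_cons h, List.drop_eq_nil_of_le (by omega)]
      simp [hdrop, spec, cur', acc']
  | case2 i cur acc h cur' acc' hne hlt ih =>
      have hi1 : i + 1 < cs.length := by omega
      have hd2 : cs.drop (i+1) = cs[i+1] :: cs.drop (i+2) := List.drop_eq_getElem_cons hi1
      have hdrop : cs.drop i = cs[i] :: cs[i+1] :: cs.drop (i+2) := by
        rw [List.drop_eq_getElem_cons h, hd2]
      rw [ih hi1, hdrop, spec]
      have hlt' : cs[i] < cs[i+1] := by
        simpa [List.getD_eq_getElem?_getD, List.getElem?_eq_getElem, h, hi1] using hlt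
      rw [if_pos hlt', ← hd2]
      simp [cur', acc']
  | case3 i cur acc h cur' acc' hne hlt ih =>
      have hi1 : i + 1 < cs.length := by omega
      have hd2 : cs.drop (i+1) = cs[i+1] :: cs.drop (i+2) := List.drop_eq_getElem_cons hi1
      have hdrop : cs.drop i = cs[i] :: cs[i+1] :: cs.drop (i+2) := by
        rw [List.drop_eq_getElem_cons h, hd2]
      rw [ih hi1, hdrop, spec]
      have hlt' : ¬ cs[i] < cs[i+1] := by
        simpa [List.getD_eq_getElem?_getD, List.getElem?_eq_getElem, h, hi1] using hlt
      rw [if_neg hlt', ← hd2]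
      simp [cur', acc']
  | case4 i cur acc h => omega

theorem spec_run (cs : List Char) (i c : Nat) (hi : i < cs.length) :
    spec c (cs.drop i) =
      ((List.range (runB cs (i+1) - i)).map (fun t : Nat => PySem.Int.toStr ((c : Int) + 1 + (t:Int)))) ++
        spec 0 (cs.drop (runB cs (i+1))) := by
  have hle : i + 1 ≤ runB cs (i+1) := runB_ge cs (i+1)
  by_cases hc : i + 1 < cs.length ∧ cs.getD i ' ' < cs.getD (i+1) ' '
  · -- the run continues past i+1
    have hkeq : runB cs (i+1) = runB cs (i+2) := by
      rw [runB]; simp only [Nat.add_sub_cancel]; rw [if_pos hc]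
    have hi1 : i + 1 < cs.length := hc.1
    have hd2 : cs.drop (i+1) = cs[i+1] :: cs.drop (i+2) := List.drop_eq_getElem_cons hi1
    have hdrop : cs.drop i = cs[i] :: cs[i+1] :: cs.drop (i+2) := by
      rw [List.drop_eq_getElem_cons hi, hd2]
    have hlt : cs[i] < cs[i+1] := by
      simpa [List.getD_eq_getElem?_getD, List.getElem?_eq_getElem, hi, hi1] using hc.2
    have hge2 : i + 2 ≤ runB cs (i+2) := runB_ge cs (i+2)
    have hK : runB cs (i+2) - i = (runB cs (i+2) - (i+1)) + 1 := by omega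
    have hmap : (List.range (runB cs (i+2) - i)).map (fun t : Nat => PySem.Int.toStr ((c:Int)+1+(t:Int)))
        = PySem.Int.toStr ((c:Int)+1) ::
          (List.range (runB cs (i+2) - (i+1))).map (fun t : Nat => PySem.Int.toStr (((c+1:Nat):Int)+1+(t:Int))) := by
      rw [hK, List.range_succ_eq_map, List.map_cons, List.map_map]
      refine congrArg₂ List.cons ?_ ?_
      · norm_num
      · apply List.map_congr_left; intro t _; simp [Function.comp]; push_cast; ring_nf
    rw [hdrop, spec, if_pos hlt, ← hd2, spec_run cs (i+1) (c+1) hi1, hkeq, hmap]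
    simp
  · -- the run stops at i+1
    have hkeq : runB cs (i+1) = i + 1 := by
      rw [runB]; simp only [Nat.add_sub_cancel]; rw [if_neg hc]
    rw [hkeq]
    by_cases hend : i + 1 < cs.length
    · have hd2 : cs.drop (i+1) = cs[i+1] :: cs.drop (i+2) := List.drop_eq_getElem_cons hend
      have hdrop : cs.drop i = cs[i] :: cs[i+1] :: cs.drop (i+2) := by
        rw [List.drop_eq_getElem_cons hi, hd2]
      have hlt : ¬ cs[i] < cs[i+1] := by
        intro hl; apply hc; refine ⟨hend, ?_⟩
        simpa [List.getD_eq_getElem?_getD, List.getElem?_eq_getElem, hi, hend] using hl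
      rw [hdrop, spec, if_neg hlt, ← hd2]
      simp
    · have hdrop : cs.drop i = [cs[i]] := by
        rw [List.drop_eq_getElem_cons hi, List.drop_eq_nil_of_le (by omega)]
      have hd1 : cs.drop (i+1) = [] := List.drop_eq_nil_of_le (by omega)
      rw [hdrop, hd1]
      simp [spec]
termination_by cs.length - i

theorem goB_eq_spec (cs : List Char) (i : Nat) : goB cs i = spec 0 (cs.drop i) := by
  fun_induction goB cs i with
  | case1 i h k ih =>
      have hs := spec_run cs i 0 h
      simp only [Nat.cast_zero, zero_add] at hs
      rw [ih, hs]
      have hk : k = runB cs (i+1) := rfl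
      rw [← hk] at *
      congr 1
      apply List.map_congr_left; intro t _; rw [add_comm]
  | case2 i h =>
      rw [List.drop_eq_nil_of_le (by omega)]
      simp [spec]

-- ===== VERDICT (by name: the statement is the Claim_ definition above) =====
theorem IncreasingSubstring_spec : Claim_equal_IncreasingSubstring := by
  intro n s _ hpre
  unfold Spec_IncreasingSubstring IncreasingSubstring IncreasingSubstring_alt
  have hne : s.toList ≠ [] := by simpa using hpre
  have hlen : 0 < s.toList.length := List.length_pos_iff.mpr hne
  rw [goA_eq_spec _ _ _ _ hlen, goB_eq_spec]
  simp
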